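-- pv_equiv track=rewrite | github.com/CombiningIdeas/introduction-to-python-2 | практическая 64 Уровень B.py | reverse_extension
-- ===== SOURCE A (Python) =====
-- def reverse_extension(x, x1):
--     if "." in x:
--         x = "".join(reversed(x))
--         x1 = "".join(reversed(x1))
--         x3 = x
--         for ii in range(len(x)):
--             if x[ii] != ".":
--                 x3 = x3[1::]
--             else:
--                 break
--         x3 = x1 + x3
--         x3 = "".join(reversed(x3))
--         return x3
--     else:
--         return x + "." + x1
-- ===== SOURCE B (Python) =====
-- def reverse_extension(x, x1):
--     idx = x.rfind(".")
--     if idx == -1: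
--         return x + "." + x1
--     return x[:idx + 1] + x1
-- ===== Notes on version B (the rewrite author's own statement) =====
-- stated objective: simpler
-- what changed: B replaces A's double string reversal plus an index loop that repeatedly re-slices the suffix with a single rfind for the last dot and one slice x[:idx+1]+x1.
import Mathlib
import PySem

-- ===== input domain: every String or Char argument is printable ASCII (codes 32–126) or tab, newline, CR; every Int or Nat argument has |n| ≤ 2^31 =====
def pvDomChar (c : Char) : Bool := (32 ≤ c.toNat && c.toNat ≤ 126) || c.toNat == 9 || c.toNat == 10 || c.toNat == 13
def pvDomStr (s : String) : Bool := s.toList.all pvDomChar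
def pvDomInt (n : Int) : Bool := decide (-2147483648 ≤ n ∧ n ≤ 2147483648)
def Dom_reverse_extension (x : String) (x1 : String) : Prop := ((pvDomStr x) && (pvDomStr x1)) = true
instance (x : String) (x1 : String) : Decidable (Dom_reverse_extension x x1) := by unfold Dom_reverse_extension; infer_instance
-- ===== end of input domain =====

-- B replaces A's double reversal + chopping loop by rfind('.') and one slice; equivalence is exact on all inputs.

-- ===== PORT A =====
-- the 'for ii in range(len(x)): if x[ii] != ".": x3 = x3[1::] else: break' loop
def revExtLoopA (xs : List Char) (ii : Nat) (x3 : List Char) : List Char :=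
  if h : ii < xs.length then
    if xs[ii] ≠ '.' then revExtLoopA xs (ii + 1) (PySem.List.slice x3 (some 1) none)
    else x3
  else x3
termination_by xs.length - ii

def reverse_extension (x : String) (x1 : String) : String :=
  if PySem.Str.isIn "." x then
    -- x = "".join(reversed(x)); x1 = "".join(reversed(x1))  (exact: join of reversed chars)
    let xr : List Char := x.toList.reverse
    let x1r : List Char := x1.toList.reverse
    let x3 := revExtLoopA xr 0 xr
    -- x3 = x1 + x3; x3 = "".join(reversed(x3))
    String.ofList (x1r ++ x3).reverse
  else
    String.ofList (x.toList ++ '.' :: x1.toList)   -- x + "." + x1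

-- ===== PORT B =====
def reverse_extension_alt (x : String) (x1 : String) : String :=
  let idx := PySem.Str.rfind x "."
  if idx = -1 then
    String.ofList (x.toList ++ '.' :: x1.toList)                          -- x + "." + x1
  else
    String.ofList (PySem.Chars.slice x.toList none (some (idx + 1)) ++ x1.toList)  -- x[:idx+1] + x1

-- ===== PRECONDITION & SPEC =====
def Spec_reverse_extension (x : String) (x1 : String) (out : String) : Prop := out = reverse_extension_alt x x1
instance (x : String) (x1 : String) (out : String) : Decidable (Spec_reverse_extension x x1 out) := by unfold Spec_reverse_extension; infer_instance

-- ===== CLAIM (what is proved, stated in full; the proofs are below) =====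
def Claim_equal_reverse_extension : Prop := ∀ (x : String) (x1 : String), Dom_reverse_extension x x1 → Spec_reverse_extension x x1 (reverse_extension x x1)

-- ===== LEMMAS AND PROOFS =====

-- equation lemmas for PySem.Chars.rfind.go specialised to sub = ['.']
lemma rfind_go_zero (l : List Char) :
    PySem.Chars.rfind.go l ['.'] 0 = if List.isPrefixOf ['.'] l then 0 else -1 := by
  rw [PySem.Chars.rfind.go]

lemma rfind_go_succ (l : List Char) (j : Nat) :
    PySem.Chars.rfind.go l ['.'] (j + 1)
      = if List.isPrefixOf ['.'] (l.drop (j + 1)) then ((j : Int) + 1)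
        else PySem.Chars.rfind.go l ['.'] j := by
  rw [PySem.Chars.rfind.go]
  push_cast
  rfl

-- ['.'] is a prefix of ys iff ys starts with '.'
lemma isPrefixOf_dot (ys : List Char) :
    List.isPrefixOf ['.'] ys = (ys.head? == some '.') := by
  cases ys with
  | nil => rfl
  | cons y t => simp [List.isPrefixOf, eq_comm]

-- A's loop, started at index ii on the remaining suffix, is dropWhile (· ≠ '.').
lemma revExtLoopA_eq (xs : List Char) (n : Nat) : ∀ (ii : Nat), xs.length - ii = n →
    revExtLoopA xs ii (xs.drop ii) = (xs.drop ii).dropWhile (· ≠ '.') := by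
  induction n with
  | zero =>
    intro ii h
    have hge : ¬ ii < xs.length := by omega
    rw [revExtLoopA]
    simp [hge, List.drop_eq_nil_of_le (by omega : xs.length ≤ ii)]
  | succ n ih =>
    intro ii h
    have hlt : ii < xs.length := by omega
    have hd : xs.drop ii = xs[ii] :: xs.drop (ii + 1) := List.drop_eq_getElem_cons hlt
    rw [revExtLoopA]
    rw [dif_pos hlt]
    by_cases hc : xs[ii] = '.'
    · rw [if_neg (by simp [hc])]
      rw [hd, List.dropWhile_cons]
      simp [hc]
    · rw [if_pos (by simp [hc])]
      have hsl : PySem.List.slice (xs.drop ii) (some 1) none = xs.drop (ii + 1) := by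
        rw [PySem.List.slice_from_one, hd]
        rfl
      rw [hsl, ih (ii + 1) (by omega), hd, List.dropWhile_cons]
      simp [hc]

-- rfind.go ignores a trailing non-dot character
lemma rfind_go_append (l : List Char) (c : Char) (hc : c ≠ '.') (j : Nat) (hj : j ≤ l.length) :
    PySem.Chars.rfind.go (l ++ [c]) ['.'] j = PySem.Chars.rfind.go l ['.'] j := by
  induction j with
  | zero =>
    rw [rfind_go_zero, rfind_go_zero, isPrefixOf_dot, isPrefixOf_dot]
    cases l with
    | nil => simp [hc]
    | cons a t => simp
  | succ j ih =>
    rw [rfind_go_succ, rfind_go_succ, isPrefixOf_dot, isPrefixOf_dot]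
    have hdrop : (l ++ [c]).drop (j + 1) = l.drop (j + 1) ++ [c] :=
      List.drop_append_of_le_length (by omega)
    rw [hdrop]
    by_cases he : j + 1 = l.length
    · have h1 : l.drop (j + 1) = [] := List.drop_eq_nil_of_le (by omega)
      rw [h1]
      simp [hc, ih (by omega)]
    · have h2 : j + 1 < l.length := by omega
      have h3 : l.drop (j + 1) = l[j + 1] :: l.drop (j + 2) := List.drop_eq_getElem_cons h2
      rw [h3]
      simp only [List.cons_append, List.head?_cons]
      rw [ih (by omega)]
      rfl

lemma rfind_go_no_dot (l : List Char) (h : '.' ∉ l) (j : Nat) :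
    PySem.Chars.rfind.go l ['.'] j = -1 := by
  induction j with
  | zero =>
    rw [rfind_go_zero, isPrefixOf_dot]
    cases hl : l.head? with
    | none => simp
    | some a =>
      have ha : a ∈ l := List.mem_of_mem_head? hl
      have : a ≠ '.' := by rintro rfl; exact h ha
      simp [this]
  | succ j ih =>
    rw [rfind_go_succ, isPrefixOf_dot]
    cases hl : (l.drop (j + 1)).head? with
    | none => simp [ih]
    | some a =>
      have ha : a ∈ l := List.mem_of_mem_drop (List.mem_of_mem_head? hl)
      have : a ≠ '.' := by rintro rfl; exact h ha
      simp [this, ih]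

lemma rfind_no_dot (l : List Char) (h : '.' ∉ l) : PySem.Chars.rfind l ['.'] = -1 := by
  have := rfind_go_no_dot l h l.length
  simpa [PySem.Chars.rfind] using this

-- the last dot of l ++ ['.'] is at index l.length
lemma rfind_append_dot (l : List Char) :
    PySem.Chars.rfind (l ++ ['.']) ['.'] = (l.length : Int) := by
  show PySem.Chars.rfind.go (l ++ ['.']) ['.'] (l ++ ['.']).length = _
  have hlen : (l ++ ['.']).length = l.length + 1 := by simp
  rw [hlen, rfind_go_succ]
  have hd : (l ++ ['.']).drop (l.length + 1) = [] := List.drop_eq_nil_of_le (by simp)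
  rw [hd, isPrefixOf_dot]
  simp only [List.head?_nil]
  rw [if_neg (by simp)]
  -- go at index l.length finds the dot there
  cases l with
  | nil =>
    simp only [List.nil_append, List.length_nil]
    rw [rfind_go_zero]
    simp
  | cons a t =>
    have : (a :: t).length = t.length + 1 := by simp
    rw [this, rfind_go_succ]
    have hd2 : ((a :: t) ++ ['.']).drop (t.length + 1) = t.drop t.length ++ ['.'] := by
      simp
    rw [hd2, List.drop_eq_nil_of_le (le_refl t.length)]
    simp

-- a trailing non-dot character does not change rfind
lemma rfind_append_nondot (l : List Char) (c : Char) (hc : c ≠ '.') :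
    PySem.Chars.rfind (l ++ [c]) ['.'] = PySem.Chars.rfind l ['.'] := by
  show PySem.Chars.rfind.go (l ++ [c]) ['.'] (l ++ [c]).length = _
  have hlen : (l ++ [c]).length = l.length + 1 := by simp
  rw [hlen, rfind_go_succ]
  have hd : (l ++ [c]).drop (l.length + 1) = [] := List.drop_eq_nil_of_le (by simp)
  rw [hd, isPrefixOf_dot]
  simp only [List.head?_nil]
  rw [if_neg (by simp)]
  exact rfind_go_append l c hc l.length (le_refl _)

-- main characterisation: with a dot present, rfind is a valid index and the slice up to it
-- (inclusive) is exactly what A's reverse/dropWhile/reverse computes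
lemma rfind_dot (l : List Char) (h : '.' ∈ l) :
    0 ≤ PySem.Chars.rfind l ['.'] ∧
    PySem.Chars.rfind l ['.'] < (l.length : Int) ∧
    l.take (PySem.Chars.rfind l ['.'] + 1).toNat
      = (l.reverse.dropWhile (· ≠ '.')).reverse := by
  induction l using List.reverseRecOn with
  | nil => simp at h
  | append_singleton l c ih =>
    by_cases hc : c = '.'
    · subst hc
      rw [rfind_append_dot]
      refine ⟨Int.natCast_nonneg _, by simp, ?_⟩
      have h1 : ((l.length : Int) + 1).toNat = l.length + 1 := by omega
      rw [h1, List.take_of_length_le (by simp)]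
      simp
    · have hmem : '.' ∈ l := by
        rcases List.mem_append.mp h with h1 | h1
        · exact h1
        · simp at h1; exact absurd h1.symm hc
      obtain ⟨h0, hlt, htake⟩ := ih hmem
      rw [rfind_append_nondot l c hc]
      refine ⟨h0, by simp; omega, ?_⟩
      rw [List.take_append_of_le_length (by omega)]
      rw [htake, List.reverse_append]
      simp [hc]

-- membership of '.' transfers between the Bool test and the list
lemma mem_of_isIn (x : String) (h : PySem.Str.isIn "." x = true) : ('.' : Char) ∈ x.toList := by
  have h2 := (PySem.Str.isIn_iff_infix (sub := ".") (s := x)).mp h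
  have h3 : ['.'] <:+: x.toList := by simpa using h2
  exact h3.subset (by simp)

lemma isIn_of_mem (x : String) (h : ('.' : Char) ∈ x.toList) : PySem.Str.isIn "." x = true := by
  apply (PySem.Str.isIn_iff_infix (sub := ".") (s := x)).mpr
  obtain ⟨s, t, hst⟩ := List.mem_iff_append.mp h
  rw [hst]
  exact ⟨s, t, by simp⟩

-- ===== VERDICT (by name: the statement is the Claim_ definition above) =====
theorem reverse_extension_spec : Claim_equal_reverse_extension := by
  intro x x1 _
  unfold Spec_reverse_extension reverse_extension reverse_extension_alt
  by_cases hin : PySem.Str.isIn "." x = true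
  · have hinf := mem_of_isIn x hin
    obtain ⟨h0, hlt, htake⟩ := rfind_dot x.toList hinf
    have hrf : PySem.Str.rfind x "." = PySem.Chars.rfind x.toList ['.'] := by
      simp [PySem.Str.rfind_eq]
    rw [if_pos hin, hrf, if_neg (by omega)]
    show String.ofList (x1.toList.reverse ++ revExtLoopA x.toList.reverse 0 x.toList.reverse).reverse
        = String.ofList (PySem.Chars.slice x.toList none (some (PySem.Chars.rfind x.toList ['.'] + 1)) ++ x1.toList)
    congr 1
    rw [List.reverse_append, List.reverse_reverse]
    have hloop : revExtLoopA x.toList.reverse 0 x.toList.reverse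
        = (x.toList.reverse).dropWhile (· ≠ '.') := by
      have := revExtLoopA_eq x.toList.reverse x.toList.reverse.length 0 (by omega)
      simpa using this
    rw [hloop]
    rw [PySem.Chars.slice_eq_listSlice, PySem.List.slice_to _ (by omega)]
    rw [htake]
  · have hmem : ('.' : Char) ∉ x.toList := fun hm => hin (isIn_of_mem x hm)
    have hrf : PySem.Str.rfind x "." = PySem.Chars.rfind x.toList ['.'] := by
      simp [PySem.Str.rfind_eq]
    rw [if_neg hin]
    simp [rfind_no_dot x.toList hmem]
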